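-- pv_equiv track=rewrite | github.com/yananfei-Bette/Leetcode | interview/amazon/oa/two_sum_but_flight.py | optimalUtilization
-- ===== SOURCE A (Python) =====
-- def optimalUtilization(maxTravelDist, forwardRouteList, returnRouteList):
-- 	if not forwardRouteList or not returnRouteList:
-- 		return []
--
-- 	f = forwardRouteList #sorted(forwardRouteList, key = lambda x: x[1])
-- 	r = returnRouteList #sorted(returnRouteList, key = lambda x: x[1])
--
-- 	res = []
-- 	minDiff = float("inf")
-- 	res = []
--
-- 	for i in range(len(f)):
-- 		if maxTravelDist < f[i][1]:
-- 			continue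
-- 		for j in range(len(r)):
-- 			if maxTravelDist < r[j][1]:
-- 				continue
--
-- 			curr = f[i][1] + r[j][1]
-- 			diff = maxTravelDist - curr
--
-- 			if 0 <= diff < minDiff:
-- 				res = [[f[i][0], r[j][0]]]
-- 				minDiff = diff
-- 			elif diff == minDiff:
-- 				res.append([f[i][0], r[j][0]])
--
-- 	return res
-- ===== SOURCE B (Python) =====
-- def optimalUtilization(maxTravelDist, forwardRouteList, returnRouteList):
--     if not forwardRouteList or not returnRouteList:
--         return []
--     # best achievable sum <= maxTravelDist via sort + two pointers
--     fvals = sorted(row[1] for row in forwardRouteList if row[1] <= maxTravelDist)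
--     rvals = sorted((row[1] for row in returnRouteList if row[1] <= maxTravelDist),
--                    reverse=True)
--     best = None
--     k = 0
--     for v in fvals:
--         while k < len(rvals) and v + rvals[k] > maxTravelDist:
--             k += 1
--         if k == len(rvals):
--             break
--         s = v + rvals[k]
--         if best is None or best < s:
--             best = s
--     if best is None:
--         return []
--     # group qualifying return ids by value, then one pass over forward rows
--     groups = {}
--     for row in returnRouteList:
--         if row[1] <= maxTravelDist:
--             groups.setdefault(row[1], []).append(row[0])
--     res = []
--     for row in forwardRouteList:
--         if row[1] <= maxTravelDist:
--             for rid in groups.get(best - row[1], []):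
--                 res.append([row[0], rid])
--     return res
-- ===== Notes on version B (the rewrite author's own statement) =====
-- stated objective: faster
-- what changed: Replaces A's O(n*m) nested scan that maintains a running min-diff with reset/append by: sort the qualifying distances and find the best reachable sum with two pointers, then group return ids by distance in a dict and emit the pairs in one ordered pass over the forward list.
-- outside the precondition, e.g. on optimalUtilization(0, [[1, 5]], [[7]]): A returns [], B raises IndexError
import Mathlib
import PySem

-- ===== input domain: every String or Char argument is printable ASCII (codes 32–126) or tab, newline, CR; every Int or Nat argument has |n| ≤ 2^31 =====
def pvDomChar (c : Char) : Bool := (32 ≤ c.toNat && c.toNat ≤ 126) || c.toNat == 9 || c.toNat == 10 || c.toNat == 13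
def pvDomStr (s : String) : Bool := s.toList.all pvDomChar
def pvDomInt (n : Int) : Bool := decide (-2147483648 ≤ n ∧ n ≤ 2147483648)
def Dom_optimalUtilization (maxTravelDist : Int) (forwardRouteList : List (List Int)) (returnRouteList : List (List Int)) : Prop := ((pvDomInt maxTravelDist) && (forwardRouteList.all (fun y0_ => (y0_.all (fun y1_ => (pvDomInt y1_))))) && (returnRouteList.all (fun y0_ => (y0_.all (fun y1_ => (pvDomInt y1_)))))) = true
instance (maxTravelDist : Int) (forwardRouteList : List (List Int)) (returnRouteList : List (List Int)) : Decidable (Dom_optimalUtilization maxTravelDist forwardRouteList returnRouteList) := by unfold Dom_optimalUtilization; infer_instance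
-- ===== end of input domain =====

-- B replaces A's O(n*m) nested min-diff scan by sort + two pointers for the best sum
-- plus a dict of return ids grouped by distance for the ordered collection (objective: faster).


-- ===== PORT A =====
-- row[i] for i = 0, 1; exact on Pre_ (every row has length ≥ 2, so pyGet? is `some`)
def pvAt (row : List Int) (i : Int) : Int := (PySem.List.pyGet? row i).getD 0

-- the inner `for j in range(len(r))` loop of A, over state (res, minDiff); minDiff : Option Int, none = inf
def pvInner (d : Int) (fr : List Int) (r : List (List Int))
    (st : List (List Int) × Option Int) : List (List Int) × Option Int :=
  r.foldl (fun st rr =>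
    if d < pvAt rr 1 then st
    else
      let curr := pvAt fr 1 + pvAt rr 1
      let diff := d - curr
      match st with
      | (res, none) =>
        -- 0 <= diff < inf  is  0 ≤ diff;  diff == inf  is never true
        if 0 ≤ diff then ([[pvAt fr 0, pvAt rr 0]], some diff) else (res, none)
      | (res, some m) =>
        if 0 ≤ diff ∧ diff < m then ([[pvAt fr 0, pvAt rr 0]], some diff)
        else if diff = m then (res ++ [[pvAt fr 0, pvAt rr 0]], some m)
        else (res, some m)) st

def optimalUtilization (maxTravelDist : Int) (forwardRouteList : List (List Int)) (returnRouteList : List (List Int)) : List (List Int) :=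
  if forwardRouteList = [] ∨ returnRouteList = [] then []
  else
    (forwardRouteList.foldl
      (fun st fr => if maxTravelDist < pvAt fr 1 then st else pvInner maxTravelDist fr returnRouteList st)
      ([], none)).1

-- ===== PORT B =====
-- `if best is None or best < s: best = s`
def pvOMax (best : Option Int) (s : Int) : Option Int :=
  match best with
  | none => some s
  | some b => if b < s then some s else some b

-- the two-pointer `for v in fvals` loop; the forward pointer k into rvals is carried as the
-- suffix rvals[k:]; the inner `while … k += 1` is dropWhile, `k == len(rvals)` is the empty suffix
def pvTP (d : Int) : List Int → List Int → Option Int → Option Int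
  | [], _, best => best
  | v :: vs, rs, best =>
    let rs' := rs.dropWhile (fun w => decide (d < v + w))
    match rs' with
    | [] => best
    | w :: _ => pvTP d vs rs' (pvOMax best (v + w))

-- groups.setdefault(row[1], []).append(row[0])
def pvGroups (d : Int) (r : List (List Int)) : PySem.Dict Int (List Int) :=
  r.foldl (fun g rr =>
    if pvAt rr 1 ≤ d then PySem.Dict.modify g (pvAt rr 1) [] (fun l => l ++ [pvAt rr 0]) else g)
    PySem.Dict.empty

def optimalUtilization_alt (maxTravelDist : Int) (forwardRouteList : List (List Int)) (returnRouteList : List (List Int)) : List (List Int) :=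
  if forwardRouteList = [] ∨ returnRouteList = [] then []
  else
    let fvals := PySem.List.sorted
      ((forwardRouteList.filter (fun row => pvAt row 1 ≤ maxTravelDist)).map (fun row => pvAt row 1))
      (fun x => x) false
    let rvals := PySem.List.sorted
      ((returnRouteList.filter (fun row => pvAt row 1 ≤ maxTravelDist)).map (fun row => pvAt row 1))
      (fun x => x) true
    match pvTP maxTravelDist fvals rvals none with
    | none => []
    | some best =>
      let g := pvGroups maxTravelDist returnRouteList
      forwardRouteList.foldl (fun res row =>
        if pvAt row 1 ≤ maxTravelDist then
          res ++ (PySem.Dict.getD g (best - pvAt row 1) []).map (fun rid => [pvAt row 0, rid])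
        else res) []

-- ===== PRECONDITION & SPEC =====
-- Pre_ excludes inputs where some route entry has fewer than 2 components: Python A indexes
-- entry[1] and raises IndexError on almost all of them, and on the residue (no qualifying forward
-- entry, malformed return entry) B's single filtering pass raises where A accidentally returns [].
def Pre_optimalUtilization (maxTravelDist : Int) (forwardRouteList : List (List Int)) (returnRouteList : List (List Int)) : Prop :=
  forwardRouteList = [] ∨ returnRouteList = [] ∨
    ((∀ row ∈ forwardRouteList, 2 ≤ row.length) ∧ (∀ row ∈ returnRouteList, 2 ≤ row.length))
instance (maxTravelDist : Int) (forwardRouteList : List (List Int)) (returnRouteList : List (List Int)) : Decidable (Pre_optimalUtilization maxTravelDist forwardRouteList returnRouteList) := by unfold Pre_optimalUtilization; infer_instance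

def pvWitness_optimalUtilization : Int × List (List Int) × List (List Int) :=
  (10, [[1, 2], [3, 4]], [[5, 6], [7, 8]])

def Spec_optimalUtilization (maxTravelDist : Int) (forwardRouteList : List (List Int)) (returnRouteList : List (List Int)) (out : List (List Int)) : Prop := out = optimalUtilization_alt maxTravelDist forwardRouteList returnRouteList
instance (maxTravelDist : Int) (forwardRouteList : List (List Int)) (returnRouteList : List (List Int)) (out : List (List Int)) : Decidable (Spec_optimalUtilization maxTravelDist forwardRouteList returnRouteList out) := by unfold Spec_optimalUtilization; infer_instance

-- ===== CLAIM (what is proved, stated in full; the proofs are below) =====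
def Claim_equal_optimalUtilization : Prop := ∀ (maxTravelDist : Int) (forwardRouteList : List (List Int)) (returnRouteList : List (List Int)), Dom_optimalUtilization maxTravelDist forwardRouteList returnRouteList → Pre_optimalUtilization maxTravelDist forwardRouteList returnRouteList → Spec_optimalUtilization maxTravelDist forwardRouteList returnRouteList (optimalUtilization maxTravelDist forwardRouteList returnRouteList)

-- ===== LEMMAS AND PROOFS =====

-- ---- the common specification: qualifying pairs, their sums, the best sum, the collection ----
def pvPairs (d : Int) (f r : List (List Int)) : List (List Int × List Int) :=
  f.flatMap (fun fr => if d < pvAt fr 1 then [] else r.map (fun rr => (fr, rr)))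

def pvSum (p : List Int × List Int) : Int := pvAt p.1 1 + pvAt p.2 1

def pvOk (d : Int) (p : List Int × List Int) : Bool :=
  decide (pvAt p.2 1 ≤ d) && decide (pvSum p ≤ d)

def pvQSumsP (d : Int) (P : List (List Int × List Int)) : List Int :=
  (P.filter (pvOk d)).map pvSum

def pvCollectP (d b : Int) (P : List (List Int × List Int)) : List (List Int) :=
  (P.filter (fun p => decide (pvAt p.2 1 ≤ d) && decide (pvSum p = b))).map
    (fun p => [pvAt p.1 0, pvAt p.2 0])

def pvState (d : Int) (P : List (List Int × List Int)) : List (List Int) × Option Int :=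
  match (pvQSumsP d P).foldl pvOMax none with
  | none => ([], none)
  | some b => (pvCollectP d b P, some (d - b))

-- A's inner-loop body as a function of one (forward row, return row) pair
def pvStep (d : Int) (st : List (List Int) × Option Int) (p : List Int × List Int) :
    List (List Int) × Option Int :=
  if d < pvAt p.2 1 then st
  else
    let diff := d - pvSum p
    match st with
    | (res, none) => if 0 ≤ diff then ([[pvAt p.1 0, pvAt p.2 0]], some diff) else (res, none)
    | (res, some m) =>
      if 0 ≤ diff ∧ diff < m then ([[pvAt p.1 0, pvAt p.2 0]], some diff)
      else if diff = m then (res ++ [[pvAt p.1 0, pvAt p.2 0]], some m)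
      else (res, some m)

-- ---- facts about the running maximum pvOMax ----
theorem pvOMax_le_self (a : Option Int) (x : Int) : ∃ m, pvOMax a x = some m ∧ x ≤ m := by
  cases a with
  | none => exact ⟨x, rfl, le_rfl⟩
  | some b =>
    by_cases h : b < x
    · exact ⟨x, by simp [pvOMax, h], le_rfl⟩
    · exact ⟨b, by simp [pvOMax, h], by omega⟩

theorem foldl_omax_init_le (l : List Int) : ∀ (m b : Int),
    l.foldl pvOMax (some m) = some b → m ≤ b := by
  induction l with
  | nil => intro m b h; simp at h; omega
  | cons x l ih =>
    intro m b h
    simp only [List.foldl_cons] at h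
    have hx : pvOMax (some m) x = some (if m < x then x else m) := by
      simp only [pvOMax]; split_ifs <;> rfl
    rw [hx] at h
    have := ih _ _ h
    split at this <;> omega

theorem foldl_omax_bound (l : List Int) : ∀ (a : Option Int) (b : Int),
    l.foldl pvOMax a = some b → ∀ x ∈ l, x ≤ b := by
  induction l with
  | nil => intro a b _ x hx; simp at hx
  | cons y l ih =>
    intro a b h x hx
    simp only [List.foldl_cons] at h
    obtain ⟨m, hm, hym⟩ := pvOMax_le_self a y
    rw [hm] at h
    rcases List.mem_cons.mp hx with rfl | hxl
    · exact le_trans hym (foldl_omax_init_le l m b h)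
    · exact ih _ _ h x hxl

theorem foldl_omax_mem (l : List Int) : ∀ (a : Option Int) (b : Int),
    l.foldl pvOMax a = some b → a = some b ∨ b ∈ l := by
  induction l with
  | nil => intro a b h; simp at h; left; exact h
  | cons x l ih =>
    intro a b h
    simp only [List.foldl_cons] at h
    rcases ih _ _ h with h' | h'
    · cases a with
      | none =>
        simp only [pvOMax] at h'
        right; simp at h'; simp [h']
      | some c =>
        simp only [pvOMax] at h'
        split at h'
        · right; simp at h'; simp [h']
        · left; exact h'
    · right; exact List.mem_cons_of_mem _ h'

theorem foldl_omax_none_mem (l : List Int) : ∀ b : Int,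
    l.foldl pvOMax none = some b → b ∈ l := by
  intro b h
  rcases foldl_omax_mem l none b h with h' | h'
  · exact absurd h' (by simp)
  · exact h'

theorem foldl_omax_some_ne_none (l : List Int) : ∀ m : Int,
    l.foldl pvOMax (some m) ≠ none := by
  induction l with
  | nil => intro m; simp
  | cons x l ih =>
    intro m
    simp only [List.foldl_cons]
    obtain ⟨k, hk, _⟩ := pvOMax_le_self (some m) x
    rw [hk]
    exact ih k

theorem foldl_omax_none_eq_none (l : List Int) :
    l.foldl pvOMax none = none → l = [] := by
  cases l with
  | nil => intro _; rfl
  | cons x l =>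
    intro h
    simp only [List.foldl_cons, pvOMax] at h
    exact absurd h (foldl_omax_some_ne_none l x)

theorem foldl_omax_of_all_le (l : List Int) (a : Int) (b : Option Int)
    (h : ∀ x ∈ l, x ≤ a) : l.foldl pvOMax (pvOMax b a) = pvOMax b a := by
  induction l with
  | nil => rfl
  | cons x l ih =>
    have hxa : x ≤ a := h x (List.mem_cons_self)
    obtain ⟨m, hm, ham⟩ := pvOMax_le_self b a
    have hstep : pvOMax (pvOMax b a) x = pvOMax b a := by
      rw [hm]; simp only [pvOMax]; rw [if_neg (by omega)]
    simp only [List.foldl_cons, hstep]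
    exact ih (fun y hy => h y (List.mem_cons_of_mem _ hy))

theorem omax_left_comm (a : Option Int) (x y : Int) :
    pvOMax (pvOMax a x) y = pvOMax (pvOMax a y) x := by
  cases a with
  | none =>
    simp only [pvOMax]
    split_ifs <;> first | rfl | (congr 1; omega)
  | some b =>
    by_cases hbx : b < x <;> by_cases hby : b < y <;>
      simp only [pvOMax, hbx, hby, if_true, if_false] <;>
      split_ifs <;> first | rfl | (congr 1; omega)

-- ---- A's nested loops compute pvState ----
theorem pvInner_eq (d : Int) (fr : List Int) (r : List (List Int))
    (st : List (List Int) × Option Int) :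
    pvInner d fr r st = (r.map (fun rr => (fr, rr))).foldl (pvStep d) st := by
  rw [List.foldl_map]
  rfl

theorem outer_eq (d : Int) (r : List (List Int)) : ∀ (f : List (List Int))
    (st : List (List Int) × Option Int),
    f.foldl (fun st fr => if d < pvAt fr 1 then st else pvInner d fr r st) st
      = (pvPairs d f r).foldl (pvStep d) st := by
  intro f
  induction f with
  | nil => intro st; rfl
  | cons fr f ih =>
    intro st
    simp only [List.foldl_cons, pvPairs, List.flatMap_cons, List.foldl_append]
    by_cases hd : d < pvAt fr 1
    · rw [if_pos hd, if_pos hd]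
      simpa [pvPairs] using ih st
    · rw [if_neg hd, if_neg hd, pvInner_eq]
      simpa [pvPairs] using ih _

theorem best_le (d : Int) (P : List (List Int × List Int)) (b : Int)
    (h : (pvQSumsP d P).foldl pvOMax none = some b) : b ≤ d := by
  have hb := foldl_omax_none_mem _ _ h
  simp only [pvQSumsP, List.mem_map, List.mem_filter] at hb
  obtain ⟨p, ⟨_, hok⟩, hsum⟩ := hb
  simp only [pvOk, Bool.and_eq_true, decide_eq_true_eq] at hok
  omega

theorem collectP_nil_of_gt (d : Int) (P : List (List Int × List Int)) (s : Int)
    (hs : s ≤ d)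
    (h : ∀ x ∈ pvQSumsP d P, x < s) : pvCollectP d s P = [] := by
  unfold pvCollectP
  rw [List.filter_eq_nil_iff.mpr, List.map_nil]
  intro p hp hcond
  simp only [Bool.and_eq_true, decide_eq_true_eq] at hcond
  obtain ⟨h1, h2⟩ := hcond
  have hmem : pvSum p ∈ pvQSumsP d P := by
    simp only [pvQSumsP, List.mem_map, List.mem_filter]
    exact ⟨p, ⟨hp, by simp [pvOk, h1]; omega⟩, rfl⟩
  have := h _ hmem
  omega

theorem pvStep_skip (d : Int) (p : List Int × List Int) (st : List (List Int) × Option Int)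
    (h2 : d < pvAt p.2 1) : pvStep d st p = st := by
  obtain ⟨res, m⟩ := st
  simp [pvStep, h2]

theorem pvStep_none (d : Int) (p : List Int × List Int) (res : List (List Int))
    (h2 : ¬ d < pvAt p.2 1) : pvStep d (res, none) p =
      if 0 ≤ d - pvSum p then ([[pvAt p.1 0, pvAt p.2 0]], some (d - pvSum p))
      else (res, none) := by
  simp [pvStep, h2]

theorem pvStep_some (d : Int) (p : List Int × List Int) (res : List (List Int)) (m : Int)
    (h2 : ¬ d < pvAt p.2 1) : pvStep d (res, some m) p =
      if 0 ≤ d - pvSum p ∧ d - pvSum p < m then ([[pvAt p.1 0, pvAt p.2 0]], some (d - pvSum p))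
      else if d - pvSum p = m then (res ++ [[pvAt p.1 0, pvAt p.2 0]], some m)
      else (res, some m) := by
  simp [pvStep, h2]

theorem foldl_step_eq_state (d : Int) (P : List (List Int × List Int)) :
    P.foldl (pvStep d) ([], none) = pvState d P := by
  induction P using List.reverseRecOn with
  | nil => rfl
  | append_singleton P p ih =>
    rw [List.foldl_append, ih]
    simp only [List.foldl_cons, List.foldl_nil]
    have hqs : pvQSumsP d (P ++ [p]) =
        pvQSumsP d P ++ (if pvOk d p then [pvSum p] else []) := by
      simp only [pvQSumsP, List.filter_append, List.map_append]
      by_cases h : pvOk d p <;> simp [h]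
    have hcol : ∀ b, pvCollectP d b (P ++ [p]) =
        pvCollectP d b P ++
          (if (decide (pvAt p.2 1 ≤ d) && decide (pvSum p = b)) then
            [[pvAt p.1 0, pvAt p.2 0]] else []) := by
      intro b
      simp only [pvCollectP, List.filter_append, List.map_append]
      by_cases h : (decide (pvAt p.2 1 ≤ d) && decide (pvSum p = b)) = true <;> simp [h]
    cases hb : (pvQSumsP d P).foldl pvOMax none with
    | none =>
      have hnil : pvQSumsP d P = [] := foldl_omax_none_eq_none _ hb
      have hst : pvState d P = ([], none) := by unfold pvState; rw [hb]
      rw [hst]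
      by_cases h2 : d < pvAt p.2 1
      · have hok : pvOk d p = false := by simp [pvOk]; omega
        have hq2 : pvQSumsP d (P ++ [p]) = [] := by rw [hqs, hnil, hok]; rfl
        rw [pvStep_skip d p _ h2]
        unfold pvState
        rw [hq2]
        rfl
      · rw [pvStep_none d p _ h2]
        by_cases h3 : pvSum p ≤ d
        · have hok : pvOk d p = true := by simp [pvOk]; omega
          have hq2 : pvQSumsP d (P ++ [p]) = [pvSum p] := by rw [hqs, hnil, hok]; rfl
          unfold pvState
          rw [hq2, if_pos (by omega : (0:Int) ≤ d - pvSum p)]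
          simp only [List.foldl_cons, List.foldl_nil, pvOMax]
          show _ = (pvCollectP d (pvSum p) (P ++ [p]), some (d - pvSum p))
          rw [hcol]
          have hcP : pvCollectP d (pvSum p) P = [] :=
            collectP_nil_of_gt d P (pvSum p) h3 (by rw [hnil]; simp)
          rw [hcP, if_pos (by simp; omega)]
          rfl
        · have hok : pvOk d p = false := by simp [pvOk]; omega
          have hq2 : pvQSumsP d (P ++ [p]) = [] := by rw [hqs, hnil, hok]; rfl
          unfold pvState
          rw [hq2, if_neg (by omega : ¬ (0:Int) ≤ d - pvSum p)]
          rfl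
    | some b =>
      have hble : b ≤ d := best_le d P b hb
      have hbound : ∀ x ∈ pvQSumsP d P, x ≤ b := foldl_omax_bound _ _ _ hb
      have hst : pvState d P = (pvCollectP d b P, some (d - b)) := by
        unfold pvState; rw [hb]
      rw [hst]
      by_cases h2 : d < pvAt p.2 1
      · have hok : pvOk d p = false := by simp [pvOk]; omega
        have hq2 : pvQSumsP d (P ++ [p]) = pvQSumsP d P := by rw [hqs, hok]; simp
        rw [pvStep_skip d p _ h2]
        unfold pvState
        rw [hq2, hb]
        show _ = (pvCollectP d b (P ++ [p]), some (d - b))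
        rw [hcol, if_neg (by simp; omega)]
        simp
      · rw [pvStep_some d p _ _ h2]
        by_cases h3 : pvSum p ≤ d
        · have hok : pvOk d p = true := by simp [pvOk]; omega
          have hq2 : pvQSumsP d (P ++ [p]) = pvQSumsP d P ++ [pvSum p] := by
            rw [hqs, hok]; rfl
          have hfold : (pvQSumsP d (P ++ [p])).foldl pvOMax none =
              pvOMax (some b) (pvSum p) := by
            rw [hq2, List.foldl_append, hb]; rfl
          by_cases h4 : b < pvSum p
          · -- strictly better sum: A resets its result list
            unfold pvState
            rw [hfold]
            simp only [pvOMax]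
            rw [if_pos h4, if_pos (by omega : 0 ≤ d - pvSum p ∧ d - pvSum p < d - b)]
            show _ = (pvCollectP d (pvSum p) (P ++ [p]), some (d - pvSum p))
            rw [hcol]
            have hcP : pvCollectP d (pvSum p) P = [] :=
              collectP_nil_of_gt d P (pvSum p) h3
                (fun x hx => by have := hbound x hx; omega)
            rw [hcP, if_pos (by simp; omega)]
            rfl
          · by_cases h5 : pvSum p = b
            · -- tie: A appends
              unfold pvState
              rw [hfold]
              simp only [pvOMax]
              rw [if_neg h4, if_neg (by omega : ¬ (0 ≤ d - pvSum p ∧ d - pvSum p < d - b)),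
                if_pos (by omega : d - pvSum p = d - b)]
              show _ = (pvCollectP d b (P ++ [p]), some (d - b))
              rw [hcol, if_pos (by simp; omega)]
            · -- strictly worse sum: skipped
              unfold pvState
              rw [hfold]
              simp only [pvOMax]
              rw [if_neg h4, if_neg (by omega : ¬ (0 ≤ d - pvSum p ∧ d - pvSum p < d - b)),
                if_neg (by omega : ¬ d - pvSum p = d - b)]
              show _ = (pvCollectP d b (P ++ [p]), some (d - b))
              rw [hcol, if_neg (by simp; omega)]
              simp
        · have hok : pvOk d p = false := by simp [pvOk]; omega
          have hq2 : pvQSumsP d (P ++ [p]) = pvQSumsP d P := by rw [hqs, hok]; simp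
          unfold pvState
          rw [hq2, hb,
            if_neg (by omega : ¬ (0 ≤ d - pvSum p ∧ d - pvSum p < d - b)),
            if_neg (by omega : ¬ d - pvSum p = d - b)]
          show _ = (pvCollectP d b (P ++ [p]), some (d - b))
          rw [hcol, if_neg (by simp; omega)]
          simp

theorem A_char (d : Int) (f r : List (List Int)) :
    optimalUtilization d f r =
      if f = [] ∨ r = [] then []
      else match (pvQSumsP d (pvPairs d f r)).foldl pvOMax none with
        | none => []
        | some b => pvCollectP d b (pvPairs d f r) := by
  unfold optimalUtilization
  by_cases hempty : f = [] ∨ r = []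
  · rw [if_pos hempty, if_pos hempty]
  · rw [if_neg hempty, if_neg hempty]
    rw [outer_eq, foldl_step_eq_state]
    unfold pvState
    cases (pvQSumsP d (pvPairs d f r)).foldl pvOMax none <;> rfl

-- ---- B's two-pointer scan computes the same best sum ----
theorem pvTP_char (d : Int) : ∀ (vs rs : List Int) (best : Option Int),
    vs.Pairwise (· ≤ ·) → rs.Pairwise (fun a b => b ≤ a) →
    pvTP d vs rs best =
      (vs.flatMap (fun v => (rs.map (fun w => v + w)).filter (fun s => decide (s ≤ d)))).foldl
        pvOMax best := by
  intro vs
  induction vs with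
  | nil => intro rs best _ _; rfl
  | cons v vs ih =>
    intro rs best hvs hrs
    have hv : ∀ v' ∈ vs, v ≤ v' := (List.pairwise_cons.mp hvs).1
    have hvs' := (List.pairwise_cons.mp hvs).2
    cases hdw : rs.dropWhile (fun w => decide (d < v + w)) with
    | nil =>
      have hall : ∀ w ∈ rs, d < v + w := by
        intro w hw
        have := (List.dropWhile_eq_nil_iff.mp hdw) w hw
        simpa using this
      have hflat : ((v :: vs).flatMap
          (fun v' => (rs.map (fun w => v' + w)).filter (fun s => decide (s ≤ d)))) = [] := by
        rw [List.flatMap_eq_nil_iff]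
        intro v' hv'
        rw [List.filter_eq_nil_iff]
        intro s hs
        simp only [List.mem_map] at hs
        obtain ⟨w, hw, rfl⟩ := hs
        have h1 := hall w hw
        have h2 : v ≤ v' := by
          rcases List.mem_cons.mp hv' with rfl | h' 
          · exact le_rfl
          · exact hv _ h'
        simp; omega
      simp only [pvTP, hdw]
      rw [hflat]
      rfl
    | cons w t =>
      have h2 : rs.dropWhile (fun w => decide (d < v + w)) ≠ [] := by simp [hdw]
      have hpw : (fun w => decide (d < v + w)) ((rs.dropWhile (fun w => decide (d < v + w))).head h2) = false :=
        List.head_dropWhile_not _ h2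
      have hhead : (rs.dropWhile (fun w => decide (d < v + w))).head h2 = w := by simp [hdw]
      rw [hhead] at hpw
      have hvw : v + w ≤ d := by simpa using hpw
      have hsub : (w :: t).Pairwise (fun a b => b ≤ a) := by
        rw [← hdw]; exact hrs.sublist (List.dropWhile_sublist _)
      have ht : ∀ x ∈ t, x ≤ w := (List.pairwise_cons.mp hsub).1
      have htake : ∀ w' ∈ rs.takeWhile (fun w => decide (d < v + w)), d < v + w' := by
        intro w' hw'
        simpa using List.mem_takeWhile_imp hw'
      have hFv : (rs.map (fun x => v + x)).filter (fun s => decide (s ≤ d))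
          = (v + w) :: t.map (fun x => v + x) := by
        conv_lhs => rw [← List.takeWhile_append_dropWhile
          (p := fun w => decide (d < v + w)) (l := rs)]
        rw [List.map_append, List.filter_append, hdw]
        have h1 : ((rs.takeWhile (fun w => decide (d < v + w))).map
            (fun x => v + x)).filter (fun s => decide (s ≤ d)) = [] := by
          rw [List.filter_eq_nil_iff]
          intro s hs
          simp only [List.mem_map] at hs
          obtain ⟨w', hw', rfl⟩ := hs
          have := htake w' hw'
          simp; omega
        rw [h1, List.nil_append]
        apply List.filter_eq_self.mpr
        intro s hs
        simp only [List.map_cons, List.mem_cons, List.mem_map] at hs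
        rcases hs with rfl | ⟨x, hx, rfl⟩
        · simp; omega
        · have := ht x hx; simp; omega
      have hrest : ∀ v' ∈ vs,
          (rs.map (fun x => v' + x)).filter (fun s => decide (s ≤ d))
            = ((w :: t).map (fun x => v' + x)).filter (fun s => decide (s ≤ d)) := by
        intro v' hv'
        conv_lhs => rw [← List.takeWhile_append_dropWhile
          (p := fun w => decide (d < v + w)) (l := rs)]
        rw [List.map_append, List.filter_append, hdw]
        have h1 : ((rs.takeWhile (fun w => decide (d < v + w))).map
            (fun x => v' + x)).filter (fun s => decide (s ≤ d)) = [] := by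
          rw [List.filter_eq_nil_iff]
          intro s hs
          simp only [List.mem_map] at hs
          obtain ⟨w', hw', rfl⟩ := hs
          have hh := htake w' hw'
          have := hv _ hv'
          simp; omega
        rw [h1, List.nil_append]
      simp only [pvTP, hdw]
      rw [ih (w :: t) (pvOMax best (v + w)) hvs' hsub]
      rw [List.flatMap_cons, List.foldl_append, hFv, List.foldl_cons]
      have hrun : (t.map (fun x => v + x)).foldl pvOMax (pvOMax best (v + w))
          = pvOMax best (v + w) := by
        apply foldl_omax_of_all_le
        intro s hs
        simp only [List.mem_map] at hs
        obtain ⟨x, hx, rfl⟩ := hs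
        have := ht x hx; omega
      rw [hrun]
      congr 1
      exact (List.flatMap_congr hrest).symm

theorem pv_filter_flatMap {α β : Type} (l : List α) (p : α → Bool) (h : α → List β) :
    (l.filter p).flatMap h = l.flatMap (fun x => if p x then h x else []) := by
  induction l with
  | nil => rfl
  | cons x l ih =>
    by_cases hp : p x <;> simp [hp, ih]

theorem sums_eq (d : Int) (f r : List (List Int)) :
    ((f.filter (fun row => pvAt row 1 ≤ d)).map (fun row => pvAt row 1)).flatMap
      (fun v => (((r.filter (fun row => pvAt row 1 ≤ d)).map (fun row => pvAt row 1)).map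
        (fun w => v + w)).filter (fun s => decide (s ≤ d)))
      = pvQSumsP d (pvPairs d f r) := by
  unfold pvQSumsP pvPairs
  rw [List.filter_flatMap, List.map_flatMap, List.flatMap_map, pv_filter_flatMap]
  apply List.flatMap_congr
  intro fr _
  by_cases hq : pvAt fr 1 ≤ d
  · rw [if_pos (by simpa using hq), if_neg (by omega : ¬ d < pvAt fr 1)]
    simp only [List.filter_map, List.map_map, List.filter_filter]
    have hpred : ∀ a ∈ r,
        (((fun s => decide (s ≤ d)) ∘ (fun w => pvAt fr 1 + w) ∘ fun row => pvAt row 1) a &&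
          decide (pvAt a 1 ≤ d)) = (pvOk d ∘ fun rr => (fr, rr)) a := by
      intro a _
      simp [pvOk, pvSum, Bool.and_comm]
      rfl
    rw [List.filter_congr hpred]
    rfl
  · rw [if_neg (by simpa using hq), if_pos (by omega : d < pvAt fr 1)]
    simp

theorem sums_perm (d : Int) (f r : List (List Int)) :
    ((PySem.List.sorted ((f.filter (fun row => pvAt row 1 ≤ d)).map (fun row => pvAt row 1)) (fun x => x) false).flatMap
      (fun v => ((PySem.List.sorted ((r.filter (fun row => pvAt row 1 ≤ d)).map (fun row => pvAt row 1)) (fun x => x) true).map (fun w => v + w)).filter (fun s => decide (s ≤ d)))).Perm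
      (pvQSumsP d (pvPairs d f r)) := by
  have hf : (PySem.List.sorted ((f.filter (fun row => pvAt row 1 ≤ d)).map (fun row => pvAt row 1))
      (fun x => x) false).Perm ((f.filter (fun row => pvAt row 1 ≤ d)).map (fun row => pvAt row 1)) := by
    apply PySem.List.sorted_perm
  have hr : (PySem.List.sorted ((r.filter (fun row => pvAt row 1 ≤ d)).map (fun row => pvAt row 1))
      (fun x => x) true).Perm ((r.filter (fun row => pvAt row 1 ≤ d)).map (fun row => pvAt row 1)) := by
    apply PySem.List.sorted_perm
  have hmain := List.Perm.flatMap hf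
    (fun a _ => List.Perm.filter (fun s => decide (s ≤ d)) (hr.map (fun w => a + w)))
  rw [sums_eq d f r] at hmain
  exact hmain

-- ---- B's grouped collection equals pvCollectP ----
theorem groups_getD (d : Int) (r : List (List Int)) (x : Int) :
    PySem.Dict.getD (pvGroups d r) x [] =
      ((r.filter (fun rr => decide (pvAt rr 1 ≤ d) && decide (pvAt rr 1 = x))).map
        (fun rr => pvAt rr 0)) := by
  have h1 : pvGroups d r =
      ((r.filter (fun rr => pvAt rr 1 ≤ d)).map (fun rr => (pvAt rr 1, pvAt rr 0))).foldl
        (fun g p => PySem.Dict.modify g p.1 [] (fun l => l ++ [p.2])) PySem.Dict.empty := by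
    rw [List.foldl_map, List.foldl_filter]
    unfold pvGroups
    apply PySem.List.foldl_congr_mem
    intro acc rr _
    by_cases h : pvAt rr 1 ≤ d <;> simp [h]
  rw [h1, PySem.Dict.getD_foldl_modify_append]
  simp only [PySem.Dict.getD_empty, List.nil_append]
  rw [List.filter_map, List.map_map, List.filter_filter]
  have hpred : ∀ a ∈ r,
      (((fun p => p.1 == x) ∘ fun rr => (pvAt rr 1, pvAt rr 0)) a && decide (pvAt a 1 ≤ d))
        = (decide (pvAt a 1 ≤ d) && decide (pvAt a 1 = x)) := by
    intro a _
    by_cases h : pvAt a 1 = x <;> by_cases h2 : pvAt a 1 ≤ d <;> simp [h, h2]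
  rw [List.filter_congr hpred]
  rfl

theorem B_collect (d b : Int) (f r : List (List Int)) :
    (f.foldl (fun res row =>
        if pvAt row 1 ≤ d then
          res ++ (PySem.Dict.getD (pvGroups d r) (b - pvAt row 1) []).map (fun rid => [pvAt row 0, rid])
        else res) [])
      = pvCollectP d b (pvPairs d f r) := by
  have h0 : (f.foldl (fun res row =>
        if pvAt row 1 ≤ d then
          res ++ (PySem.Dict.getD (pvGroups d r) (b - pvAt row 1) []).map (fun rid => [pvAt row 0, rid])
        else res) [])
      = f.foldl (fun res row => res ++
          (if pvAt row 1 ≤ d then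
            (PySem.Dict.getD (pvGroups d r) (b - pvAt row 1) []).map (fun rid => [pvAt row 0, rid])
          else [])) [] := by
    apply PySem.List.foldl_congr_mem
    intro acc row _
    split_ifs <;> simp
  rw [h0, PySem.List.foldl_append_eq_flatMap, List.nil_append]
  unfold pvCollectP pvPairs
  rw [List.filter_flatMap, List.map_flatMap]
  apply List.flatMap_congr
  intro fr _
  by_cases hq : pvAt fr 1 ≤ d
  · rw [if_pos hq, if_neg (by omega : ¬ d < pvAt fr 1), groups_getD]
    simp only [List.filter_map, List.map_map]
    have hpred : ∀ a ∈ r,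
        ((fun rr => decide (pvAt rr 1 ≤ d) && decide (pvAt rr 1 = b - pvAt fr 1)) a)
          = ((fun p => decide (pvAt p.2 1 ≤ d) && decide (pvSum p = b)) ∘ fun rr => (fr, rr)) a := by
      intro a _
      simp only [Function.comp_def, pvSum]
      congr 1
      exact decide_eq_decide.mpr (by omega)
    rw [List.filter_congr hpred]
    rfl
  · rw [if_neg hq, if_pos (by omega : d < pvAt fr 1)]
    simp

theorem B_char (d : Int) (f r : List (List Int)) :
    optimalUtilization_alt d f r =
      if f = [] ∨ r = [] then []
      else match (pvQSumsP d (pvPairs d f r)).foldl pvOMax none with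
        | none => []
        | some b => pvCollectP d b (pvPairs d f r) := by
  by_cases hempty : f = [] ∨ r = []
  · simp only [optimalUtilization_alt, if_pos hempty]
  · simp only [optimalUtilization_alt, if_neg hempty]
    have hfp : (PySem.List.sorted ((f.filter (fun row => pvAt row 1 ≤ d)).map
        (fun row => pvAt row 1)) (fun x => x) false).Pairwise (· ≤ ·) := by
      apply PySem.List.sorted_pairwise
    have hrp : (PySem.List.sorted ((r.filter (fun row => pvAt row 1 ≤ d)).map
        (fun row => pvAt row 1)) (fun x => x) true).Pairwise (fun a b => b ≤ a) := by
      apply PySem.List.sorted_pairwise_rev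
    rw [pvTP_char d _ _ none hfp hrp,
      List.Perm.foldl_eq (rcomm := ⟨omax_left_comm⟩) (sums_perm d f r)]
    cases hbv : (pvQSumsP d (pvPairs d f r)).foldl pvOMax none with
    | none => rfl
    | some b =>
      show _ = pvCollectP d b (pvPairs d f r)
      exact B_collect d b f r

-- ===== VERDICT (by name: the statement is the Claim_ definition above) =====
theorem optimalUtilization_spec : Claim_equal_optimalUtilization := by
  intro d f r _ _
  unfold Spec_optimalUtilization
  rw [A_char, B_char]
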